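-- pv_equiv track=rewrite | github.com/AndrewLrrr/stepik-algorithms-theory-and-practice | module2/task3_various_components.py | various_components
-- ===== SOURCE A (Python) =====
-- def various_components(n):
--     terms = []
--     t = 1
--     while True:
--         rest = n - t
--         if rest == 0:
--             terms.append(t)
--             break
--         elif rest <= t:
--             t += 1
--             continue
--         else:
--             n = rest
--             terms.append(t)
--             t += 1
--     return terms
-- ===== SOURCE B (Python) =====
-- import math
--
-- def various_components(n):
--     # largest k with k*(k+1)//2 <= n
--     k = (math.isqrt(8 * n + 1) - 1) // 2
--     if k * (k + 1) // 2 == n: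
--         return list(range(1, k + 1))
--     return list(range(1, k)) + [n - (k - 1) * k // 2]
-- ===== Notes on version B (the rewrite author's own statement) =====
-- stated objective: simpler
-- what changed: Replaces A's incremental subtract-and-decide while-loop with a closed-form triangular cutoff k = (isqrt(8n+1)-1)//2 and a single range construction.
-- outside the precondition, e.g. on various_components(0): A does not finish within the time limit, B returns []
import Mathlib
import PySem

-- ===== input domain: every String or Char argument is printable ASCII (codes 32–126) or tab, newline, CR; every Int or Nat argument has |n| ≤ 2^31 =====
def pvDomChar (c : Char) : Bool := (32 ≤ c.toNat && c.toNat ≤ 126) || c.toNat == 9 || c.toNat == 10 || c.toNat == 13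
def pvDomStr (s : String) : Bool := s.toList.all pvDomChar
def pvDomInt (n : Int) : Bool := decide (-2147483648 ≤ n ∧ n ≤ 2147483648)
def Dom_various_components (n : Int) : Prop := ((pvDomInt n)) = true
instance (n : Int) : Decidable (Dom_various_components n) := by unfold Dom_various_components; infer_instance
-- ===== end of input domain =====

-- B replaces A's subtract-and-decide loop by a closed-form triangular cutoff (isqrt): simpler.
-- ===== PORT A =====
-- A's `while True` loop, fuel-guarded (the fuel only makes the recursion total; it is
-- sufficient on every input satisfying Pre_, where the Python loop terminates).
def vcLoopA (fuel : Nat) (n t : Int) (terms : List Int) : List Int :=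
  match fuel with
  | 0 => terms
  | fuel + 1 =>
    if n - t = 0 then terms ++ [t]
    else if n - t ≤ t then vcLoopA fuel n (t + 1) terms
    else vcLoopA fuel (n - t) (t + 1) (terms ++ [t])

def various_components (n : Int) : List Int :=
  vcLoopA ((2 * n).toNat + 1) n 1 []

-- ===== PORT B =====
def various_components_alt (n : Int) : List Int :=
  let k : Int := PySem.Int.floordiv ((Nat.sqrt (8 * n + 1).toNat : Int) - 1) 2
  if PySem.Int.floordiv (k * (k + 1)) 2 = n then PySem.List.pyRange 1 (k + 1) 1
  else PySem.List.pyRange 1 k 1 ++ [n - PySem.Int.floordiv ((k - 1) * k) 2]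

-- ===== PRECONDITION & SPEC =====
-- A's while-loop never terminates for n ≤ 0 (rest = n - t never hits zero), so Pre_
-- admits exactly the positive integers, i.e. every input on which A returns.
def Pre_various_components (n : Int) : Prop := 1 ≤ n
instance (n : Int) : Decidable (Pre_various_components n) := by unfold Pre_various_components; infer_instance
def pvWitness_various_components : Int := 7

def Spec_various_components (n : Int) (out : List Int) : Prop := out = various_components_alt n
instance (n : Int) (out : List Int) : Decidable (Spec_various_components n out) := by unfold Spec_various_components; infer_instance

-- ===== CLAIM (what is proved, stated in full; the proofs are below) =====
def Claim_equal_various_components : Prop := ∀ (n : Int), Dom_various_components n → Pre_various_components n → Spec_various_components n (various_components n)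

-- ===== LEMMAS AND PROOFS =====

-- Abstract description of the loop's result from state (n, t): once n ≤ 2t no further term
-- is emitted except the final n; otherwise t is emitted and the state becomes (n - t, t + 1).
def vcSpec (n t : Int) : List Int :=
  if n ≤ 2 * t ∨ t < 1 then [n]
  else t :: vcSpec (n - t) (t + 1)
termination_by n.toNat
decreasing_by omega

lemma vcSpec_base (n t : Int) (h2 : n ≤ 2 * t) : vcSpec n t = [n] := by
  rw [vcSpec, if_pos (Or.inl h2)]

lemma vcSpec_step (n t : Int) (h1 : 1 ≤ t) (h2 : 2 * t < n) :
    vcSpec n t = t :: vcSpec (n - t) (t + 1) := by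
  rw [vcSpec, if_neg (by omega)]

lemma vcLoopA_eq_vcSpec : ∀ (fuel : Nat) (n t : Int) (acc : List Int),
    1 ≤ t → t ≤ n → (2 * n - t).toNat < fuel →
    vcLoopA fuel n t acc = acc ++ vcSpec n t := by
  intro fuel
  induction fuel with
  | zero => intro n t acc ht htn hf; exact absurd hf (by omega)
  | succ fuel ih =>
    intro n t acc ht htn hf
    rw [vcLoopA]
    by_cases h0 : n - t = 0
    · rw [if_pos h0]
      have hnt : n = t := by omega
      rw [hnt, vcSpec_base t t (by omega)]
    · rw [if_neg h0]
      by_cases h1 : n - t ≤ t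
      · rw [if_pos h1]
        rw [ih n (t + 1) acc (by omega) (by omega) (by omega)]
        rw [vcSpec_base n (t + 1) (by omega), vcSpec_base n t (by omega)]
      · rw [if_neg h1]
        rw [ih (n - t) (t + 1) (acc ++ [t]) (by omega) (by omega) (by omega)]
        rw [vcSpec_step n t ht (by omega)]
        simp

-- Closed form of vcSpec: if the terms t, …, t+d fit below n but t, …, t+d+1 do not, the
-- result is t, …, t+d-1 followed by the remainder n - c, where 2c = 2dt + d(d-1).
lemma vcSpec_closed : ∀ (d : Nat) (t n c : Int), 1 ≤ t →
    2 * c = 2 * (d : Int) * t + (d : Int) * ((d : Int) - 1) →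
    2 * ((d : Int) + 1) * t + (d : Int) * ((d : Int) + 1) ≤ 2 * n →
    2 * n < 2 * ((d : Int) + 2) * t + ((d : Int) + 1) * ((d : Int) + 2) →
    vcSpec n t = PySem.List.pyRange t (t + (d : Int)) 1 ++ [n - c] := by
  intro d
  induction d with
  | zero =>
    intro t n c ht hc h1 h2
    push_cast at hc h1 h2
    rw [vcSpec_base n t (by linarith)]
    have hc0 : c = 0 := by linarith
    rw [hc0]
    rw [show t + ((0 : Nat) : Int) = t by push_cast; ring]
    rw [PySem.List.pyRange_one_eq_nil le_rfl]
    norm_num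
  | succ d ih =>
    intro t n c ht hc h1 h2
    push_cast at hc h1 h2 ⊢
    have hd : (0 : Int) ≤ (d : Int) := Int.natCast_nonneg d
    have hgt : 2 * t < n := by nlinarith
    rw [vcSpec_step n t ht hgt]
    have hih := ih (t + 1) (n - t) (c - t) (by omega)
      (by linear_combination hc) (by linarith) (by linarith)
    push_cast at hih
    rw [show t + 1 + (d : Int) = t + ((d : Int) + 1) from by ring] at hih
    rw [hih]
    rw [PySem.List.pyRange_one_cons (by omega : t < t + ((d : Int) + 1))]
    rw [show n - t - (c - t) = n - c from by ring]
    simp [List.cons_append]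

-- The isqrt-based cutoff: for n ≥ 1, k is the largest integer with k(k+1)/2 ≤ n.
lemma k_char (n : Int) (hn : 1 ≤ n) (k : Int)
    (hk : k = PySem.Int.floordiv ((Nat.sqrt (8 * n + 1).toNat : Int) - 1) 2) :
    1 ≤ k ∧ k * (k + 1) ≤ 2 * n ∧ 2 * n < (k + 1) * (k + 2) := by
  have hm : (((8 * n + 1).toNat : Nat) : Int) = 8 * n + 1 := by omega
  have hs2 : ((Nat.sqrt (8 * n + 1).toNat : Nat) : Int) * (Nat.sqrt (8 * n + 1).toNat : Int) ≤ 8 * n + 1 := by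
    have h := Nat.sqrt_le' (8 * n + 1).toNat
    rw [pow_two] at h
    rw [← hm]; exact_mod_cast h
  have hs3 : 8 * n + 1 < ((Nat.sqrt (8 * n + 1).toNat : Int) + 1) * ((Nat.sqrt (8 * n + 1).toNat : Int) + 1) := by
    have h := Nat.lt_succ_sqrt' (8 * n + 1).toNat
    rw [Nat.succ_eq_add_one, pow_two] at h
    have h' : ((8 * n + 1).toNat : Int) < ((Nat.sqrt (8 * n + 1).toNat : Int) + 1) * ((Nat.sqrt (8 * n + 1).toNat : Int) + 1) := by
      exact_mod_cast h
    omega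
  have hs1 : 3 ≤ Nat.sqrt (8 * n + 1).toNat := by
    have h9 : 3 * 3 ≤ (8 * n + 1).toNat := by omega
    exact Nat.le_sqrt'.mpr h9
  have hs1' : (3 : Int) ≤ (Nat.sqrt (8 * n + 1).toNat : Int) := by exact_mod_cast hs1
  rw [PySem.Int.floordiv_eq_ediv_of_pos (by norm_num : (0 : Int) < 2)] at hk
  have hkb : 2 * k + 1 ≤ (Nat.sqrt (8 * n + 1).toNat : Int) ∧
      (Nat.sqrt (8 * n + 1).toNat : Int) ≤ 2 * k + 2 := by omega
  refine ⟨by omega, ?_, ?_⟩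
  · nlinarith [hkb.1, hs2]
  · nlinarith [hkb.2, hs3]

-- Both even products halved exactly: 2 * (a(a+1)/2) = a(a+1).
lemma half_even (a : Int) : 2 * (a * (a + 1) / 2) = a * (a + 1) :=
  Int.two_mul_ediv_two_of_even (Int.even_mul_succ_self a)

lemma alt_eq_vcSpec (n : Int) (hn : 1 ≤ n) : various_components_alt n = vcSpec n 1 := by
  simp only [various_components_alt]
  set K : Int := PySem.Int.floordiv ((Nat.sqrt (8 * n + 1).toNat : Int) - 1) 2 with hK
  obtain ⟨hk1, hk2, hk3⟩ := k_char n hn K hK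
  have hy : 2 * ((K - 1) * K / 2) = (K - 1) * K := by
    have h := half_even (K - 1)
    rw [show (K - 1) * (K - 1 + 1) = (K - 1) * K by ring] at h
    exact h
  have hfd2 : PySem.Int.floordiv ((K - 1) * K) 2 = (K - 1) * K / 2 :=
    PySem.Int.floordiv_eq_ediv_of_pos (by norm_num)
  have hspec : vcSpec n 1 = PySem.List.pyRange 1 K 1 ++ [n - (K - 1) * K / 2] := by
    have hd : (((K - 1).toNat : Nat) : Int) = K - 1 := by omega
    have h := vcSpec_closed (K - 1).toNat 1 n ((K - 1) * K / 2) le_rfl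
      (by rw [hd]; linear_combination hy) (by rw [hd]; nlinarith) (by rw [hd]; nlinarith)
    rw [hd] at h
    rw [h, show (1 : Int) + (K - 1) = K by ring]
  by_cases hcase : PySem.Int.floordiv (K * (K + 1)) 2 = n
  · rw [if_pos hcase, hspec]
    rw [PySem.Int.floordiv_eq_ediv_of_pos (by norm_num : (0 : Int) < 2)] at hcase
    have hx : 2 * n = K * (K + 1) := by
      have h := half_even K
      rw [hcase] at h
      omega
    have hlk : n - (K - 1) * K / 2 = K := by
      have e : K * (K + 1) - (K - 1) * K = 2 * K := by ring
      omega
    rw [hlk, PySem.List.pyRange_one_succ_right (by omega : (1 : Int) ≤ K)]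
  · rw [if_neg hcase, hfd2, hspec]

-- ===== VERDICT (by name: the statement is the Claim_ definition above) =====
theorem various_components_spec : Claim_equal_various_components := by
  intro n _ hn
  unfold Spec_various_components
  rw [various_components,
    vcLoopA_eq_vcSpec ((2 * n).toNat + 1) n 1 [] le_rfl hn (by omega),
    alt_eq_vcSpec n hn]
  rfl
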